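-- pv_equiv track=rewrite | github.com/opensearch-project/opensearch-migrations | AIAdvisor/skills/solr-opensearch-migration-advisor/scripts/query_converter.py | _split_boolean
-- ===== SOURCE A (Python) =====
-- def _split_boolean(query: str) -> tuple[str, list[str]] | None:
--     """Split a query on a top-level AND or OR operator.
--
--     Returns ``(operator, [parts])`` or ``None`` if no top-level operator is
--     found.  Only splits on AND/OR that are not inside parentheses or quotes.
--     """
--     depth = 0
--     in_quote = False
--
--     for i, ch in enumerate(query):
--         if ch == '"':
--             in_quote = not in_quote
--             continue
--         if in_quote:
--             continue
--
--         if ch == '(':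
--             depth += 1
--         elif ch == ')':
--             depth -= 1
--         elif depth == 0:
--             found = _find_op_at_index(query, i)
--             if found:
--                 return found
--
--     return None
--
-- def _find_op_at_index(query: str, i: int) -> tuple[str, list[str]] | None:
--     """Check for AND/OR at the given index and return the operator and parts."""
--     for op in (' AND ', ' OR '):
--         if query[i:].upper().startswith(op):
--             left = query[:i].strip()
--             right = query[i + len(op):].strip()
--             return op.strip(), [left, right]
--     return None
-- ===== SOURCE B (Python) =====
-- def _split_boolean(query: str) -> tuple[str, list[str]] | None:
--     """Split a query on the first top-level AND/OR (two-phase: mask, then per-operator find)."""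
--     u = query.upper()
--
--     # Phase 1: boolean mask of positions that are top-level (outside parens/quotes).
--     mask = []
--     depth = 0
--     in_quote = False
--     for ch in query:
--         if ch == '"':
--             mask.append(False)
--             in_quote = not in_quote
--         elif in_quote:
--             mask.append(False)
--         elif ch == '(':
--             mask.append(False)
--             depth += 1
--         elif ch == ')':
--             mask.append(False)
--             depth -= 1
--         else:
--             mask.append(depth == 0)
--
--     # Phase 2: for each operator, find its first top-level occurrence; keep the earliest.
--     best = None
--     for op in (' AND ', ' OR '):
--         j = u.find(op)
--         while j >= 0 and not mask[j]:
--             j = u.find(op, j + 1)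
--         if j >= 0 and (best is None or j < best[0]):
--             best = (j, op)
--
--     if best is None:
--         return None
--     j, op = best
--     return op.strip(), [query[:j].strip(), query[j + len(op):].strip()]
-- ===== Notes on version B (the rewrite author's own statement) =====
-- stated objective: faster
-- what changed: Instead of scanning every index and calling a per-index check that uppercases the whole remaining suffix for both operators, B precomputes a top-level mask in one pass, uppercases the query once, and uses str.find per operator to jump directly between occurrences, merging the two first top-level occurrences by smallest index.
import Mathlib
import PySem

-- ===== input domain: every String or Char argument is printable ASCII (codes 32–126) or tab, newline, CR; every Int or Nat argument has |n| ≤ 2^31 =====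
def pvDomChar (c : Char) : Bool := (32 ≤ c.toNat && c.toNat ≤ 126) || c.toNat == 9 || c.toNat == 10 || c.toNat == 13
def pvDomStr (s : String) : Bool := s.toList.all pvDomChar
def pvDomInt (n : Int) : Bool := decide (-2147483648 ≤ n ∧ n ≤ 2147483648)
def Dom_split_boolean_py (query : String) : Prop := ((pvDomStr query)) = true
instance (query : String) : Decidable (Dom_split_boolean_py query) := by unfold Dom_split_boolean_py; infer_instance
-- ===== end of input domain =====

-- B replaces A's per-index scan (which uppercases the whole remaining suffix at every
-- top-level index) by a two-phase search: precompute a top-level mask and uppercase once,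
-- then use string find per operator and merge the two first top-level occurrences by
-- smallest index (objective: faster; measured faster in a timing run).

-- ===== PORT A =====
-- helper _find_op_at_index: for op in (' AND ', ' OR '): if query[i:].upper().startswith(op): …
def findOpAtIndex (q : List Char) (i : Int) : Option (String × List String) :=
  if PySem.Chars.startswith (PySem.Chars.upper (PySem.List.slice q (some i) none)) (" AND ".toList) then
    some (String.ofList (PySem.Chars.strip (" AND ".toList)),
      [String.ofList (PySem.Chars.strip (PySem.List.slice q none (some i))),
       String.ofList (PySem.Chars.strip (PySem.List.slice q (some (i + 5)) none))])
  else if PySem.Chars.startswith (PySem.Chars.upper (PySem.List.slice q (some i) none)) (" OR ".toList) then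
    some (String.ofList (PySem.Chars.strip (" OR ".toList)),
      [String.ofList (PySem.Chars.strip (PySem.List.slice q none (some i))),
       String.ofList (PySem.Chars.strip (PySem.List.slice q (some (i + 4)) none))])
  else none

-- the 'for i, ch in enumerate(query)' loop with early return
def loopA (q : List Char) : List (Int × Char) → Int → Bool → Option (String × List String)
  | [], _, _ => none
  | (i, ch) :: rest, depth, inq =>
    if ch = '"' then loopA q rest depth (!inq)
    else if inq then loopA q rest depth inq
    else if ch = '(' then loopA q rest (depth + 1) inq
    else if ch = ')' then loopA q rest (depth - 1) inq
    else if depth = 0 then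
      match findOpAtIndex q i with
      | some found => some found
      | none => loopA q rest depth inq
    else loopA q rest depth inq

def split_boolean_py (query : String) : Option (String × List String) :=
  loopA query.toList (PySem.List.enumerate query.toList) 0 false

-- ===== PORT B =====
-- phase 1 loop body: append to the mask while tracking depth and quote state
def maskStep (acc : List Bool × Int × Bool) (ch : Char) : List Bool × Int × Bool :=
  match acc with
  | (m, depth, inq) =>
    if ch = '"' then (m ++ [false], depth, !inq)
    else if inq then (m ++ [false], depth, inq)
    else if ch = '(' then (m ++ [false], depth + 1, inq)
    else if ch = ')' then (m ++ [false], depth - 1, inq)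
    else (m ++ [decide (depth = 0)], depth, inq)

-- phase 2 inner while loop: 'while j >= 0 and not mask[j]: j = u.find(op, j + 1)'
-- (fuel only makes the loop structurally total; it is never exhausted)
def findLoop (u : List Char) (mask : List Bool) (op : List Char) : Int → Nat → Int
  | j, 0 => j
  | j, fuel + 1 =>
    if decide (0 ≤ j) && !(PySem.List.pyGetD mask j false) then
      findLoop u mask op (PySem.Chars.findFrom u op (j + 1)) fuel
    else j

def split_boolean_py_alt (query : String) : Option (String × List String) :=
  let q := query.toList
  let u := PySem.Chars.upper q
  let mask := (q.foldl maskStep ([], 0, false)).1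
  -- for op in (' AND ', ' OR '): … (two iterations, unrolled)
  let jA := findLoop u mask (" AND ".toList) (PySem.Chars.find u (" AND ".toList)) (u.length + 2)
  let best : Option (Int × List Char) := if 0 ≤ jA then some (jA, " AND ".toList) else none
  let jO := findLoop u mask (" OR ".toList) (PySem.Chars.find u (" OR ".toList)) (u.length + 2)
  let best := if decide (0 ≤ jO) && (match best with | none => true | some (a, _) => decide (jO < a)) then
      some (jO, " OR ".toList) else best
  match best with
  | none => none
  | some (j, op) =>
    some (String.ofList (PySem.Chars.strip op),
      [String.ofList (PySem.Chars.strip (PySem.List.slice q none (some j))),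
       String.ofList (PySem.Chars.strip (PySem.List.slice q (some (j + (op.length : Int))) none))])

-- ===== PRECONDITION & SPEC =====
def Spec_split_boolean_py (query : String) (out : Option (String × List String)) : Prop := out = split_boolean_py_alt query
instance (query : String) (out : Option (String × List String)) : Decidable (Spec_split_boolean_py query out) := by unfold Spec_split_boolean_py; infer_instance

-- ===== CLAIM (what is proved, stated in full; the proofs are below) =====
def Claim_equal_split_boolean_py : Prop := ∀ (query : String), Dom_split_boolean_py query → Spec_split_boolean_py query (split_boolean_py query)

-- ===== LEMMAS AND PROOFS =====

-- state transition of one character (depth, in_quote)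
def stepSt (s : Int × Bool) (ch : Char) : Int × Bool :=
  if ch = '"' then (s.1, !s.2)
  else if s.2 then s
  else if ch = '(' then (s.1 + 1, s.2)
  else if ch = ')' then (s.1 - 1, s.2)
  else s

-- is a character at state s a top-level (operator-checkable) position?
def topChar (s : Int × Bool) (ch : Char) : Bool :=
  !(ch = '"') && !s.2 && !(ch = '(') && !(ch = ')') && decide (s.1 = 0)

def maskRec : List Char → (Int × Bool) → List Bool
  | [], _ => []
  | ch :: t, s => topChar s ch :: maskRec t (stepSt s ch)

def topAt (q : List Char) (i : Nat) : Bool := (maskRec q (0, false)).getD i false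

def swOp (q : List Char) (i : Nat) (op : List Char) : Bool :=
  PySem.Chars.startswith (PySem.Chars.upper (q.drop i)) op

def Phit (q : List Char) (i : Nat) : Bool :=
  topAt q i && (swOp q i (" AND ".toList) || swOp q i (" OR ".toList))

def firstFrom (q : List Char) : Nat → List Char → Option Nat
  | _, [] => none
  | k, _ :: t => if Phit q k then some k else firstFrom q (k + 1) t

-- common normal form of both programs
def normalForm (q : List Char) : Option (String × List String) :=
  match firstFrom q 0 q with
  | none => none
  | some i => findOpAtIndex q (i : Int)

theorem maskRec_length (q : List Char) (s : Int × Bool) : (maskRec q s).length = q.length := by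
  induction q generalizing s with
  | nil => rfl
  | cons ch t ih => simp [maskRec, ih]

theorem maskRec_getD (q : List Char) (s : Int × Bool) (i : Nat) (h : i < q.length) :
    (maskRec q s).getD i false = topChar ((q.take i).foldl stepSt s) (q.getD i ' ') := by
  induction q generalizing s i with
  | nil => simp at h
  | cons ch t ih =>
    cases i with
    | zero => simp [maskRec]
    | succ n =>
      simp only [maskRec, List.getD_cons_succ, List.take_succ_cons, List.foldl_cons]
      exact ih (stepSt s ch) n (by simpa using h)

theorem topAt_of_ge (q : List Char) (i : Nat) (h : q.length ≤ i) : topAt q i = false := by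
  unfold topAt
  exact List.getD_eq_default _ _ (by rw [maskRec_length]; exact h)

theorem mask_fold (q : List Char) : ∀ (m : List Bool) (s : Int × Bool),
    q.foldl maskStep (m, s) = (m ++ maskRec q s, q.foldl stepSt s) := by
  induction q with
  | nil => simp [maskRec]
  | cons ch t ih =>
    intro m s
    simp only [List.foldl_cons, maskRec]
    have hstep : maskStep (m, s) ch = (m ++ [topChar s ch], stepSt s ch) := by
      obtain ⟨d, inq⟩ := s
      simp only [maskStep, stepSt, topChar]
      by_cases h1 : ch = '"' <;> by_cases h2 : inq <;> by_cases h3 : ch = '(' <;>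
        by_cases h4 : ch = ')' <;> simp [h1, h2, h3, h4]
    rw [hstep, ih]
    simp

theorem upper_drop (q : List Char) (i : Nat) :
    (PySem.Chars.upper q).drop i = PySem.Chars.upper (q.drop i) := by
  show (q.map PySem.Chars.upperChar).drop i = (q.drop i).map PySem.Chars.upperChar
  simp [List.map_drop]

theorem findOpAtIndex_cast (q : List Char) (k : Nat) :
    findOpAtIndex q (k : Int) =
      if swOp q k (" AND ".toList) then
        some (String.ofList (PySem.Chars.strip (" AND ".toList)),
          [String.ofList (PySem.Chars.strip (PySem.List.slice q none (some (k : Int)))),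
           String.ofList (PySem.Chars.strip (PySem.List.slice q (some ((k : Int) + 5)) none))])
      else if swOp q k (" OR ".toList) then
        some (String.ofList (PySem.Chars.strip (" OR ".toList)),
          [String.ofList (PySem.Chars.strip (PySem.List.slice q none (some (k : Int)))),
           String.ofList (PySem.Chars.strip (PySem.List.slice q (some ((k : Int) + 4)) none))])
      else none := by
  simp only [findOpAtIndex, swOp, PySem.List.slice_from_natCast]
  rfl

theorem loopA_eq (q : List Char) : ∀ (t : List Char) (k : Nat), t = q.drop k →
    loopA q (PySem.List.enumerate t (k : Int))
        ((q.take k).foldl stepSt (0, false)).1 ((q.take k).foldl stepSt (0, false)).2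
      = match firstFrom q k t with
        | none => none
        | some i => findOpAtIndex q (i : Int) := by
  intro t
  induction t with
  | nil => intro k ht; simp [PySem.List.enumerate, loopA, firstFrom]
  | cons ch t' ih =>
    intro k ht
    have hk : k < q.length := by
      by_contra hge
      push Not at hge
      rw [List.drop_eq_nil_of_le hge] at ht
      exact (List.cons_ne_nil ch t') ht
    have hch : q[k] = ch := by
      have := List.drop_eq_getElem_cons hk (l := q)
      rw [this] at ht
      exact ((List.cons.injEq _ _ _ _).mp ht.symm).1
    have ht' : t' = q.drop (k + 1) := by
      have := List.drop_eq_getElem_cons hk (l := q)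
      rw [this] at ht
      exact ((List.cons.injEq _ _ _ _).mp ht.symm).2.symm
    rcases hstv : (q.take k).foldl stepSt (0, false) with ⟨d, inq⟩
    have hstep : (q.take (k + 1)).foldl stepSt (0, false) = stepSt (d, inq) ch := by
      rw [List.take_add_one, List.getElem?_eq_getElem hk, hch]
      simp [List.foldl_append, hstv]
    have htop : topAt q k = topChar (d, inq) ch := by
      unfold topAt
      rw [maskRec_getD q (0, false) k hk, List.getD_eq_getElem q ' ' hk, hch, hstv]
    have hih := ih (k + 1) ht'
    rw [hstep] at hih
    have hcast : (k : Int) + 1 = ((k + 1 : Nat) : Int) := by push_cast; ring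
    rw [PySem.List.enumerate_cons, hcast]
    by_cases h1 : ch = '"'
    · rw [show stepSt (d, inq) ch = (d, !inq) from by simp [stepSt, h1]] at hih
      have hP : Phit q k = false := by simp [Phit, htop, topChar, h1]
      simp only [loopA, h1, if_true, firstFrom, hP, Bool.false_eq_true, if_false]
      exact hih
    · by_cases h2 : inq = true
      · rw [show stepSt (d, inq) ch = (d, inq) from by simp [stepSt, h1, h2]] at hih
        rw [h2] at hih
        have hP : Phit q k = false := by simp [Phit, htop, topChar, h2]
        simp only [loopA, h1, h2, if_false, if_true, firstFrom, hP, Bool.false_eq_true]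
        exact hih
      · have hinq : inq = false := Bool.eq_false_iff.mpr h2
        subst hinq
        by_cases h3 : ch = '('
        · rw [show stepSt (d, false) ch = (d + 1, false) from by simp [stepSt, h1, h3]] at hih
          have hP : Phit q k = false := by simp [Phit, htop, topChar, h3]
          simp only [loopA, h1, h3, if_false, if_true, firstFrom, hP, Bool.false_eq_true]
          exact hih
        · by_cases h4 : ch = ')'
          · rw [show stepSt (d, false) ch = (d - 1, false) from by
              simp [stepSt, h1, h3, h4]] at hih
            have hP : Phit q k = false := by simp [Phit, htop, topChar, h4]
            simp only [loopA, h1, h3, h4, if_false, if_true, firstFrom, hP, Bool.false_eq_true]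
            exact hih
          · rw [show stepSt (d, false) ch = (d, false) from by
              simp [stepSt, h1, h3, h4]] at hih
            by_cases h5 : d = 0
            · subst h5
              have htop' : topChar ((0 : Int), false) ch = true := by
                simp [topChar, h1, h3, h4]
              by_cases hsw : (swOp q k (" AND ".toList) || swOp q k (" OR ".toList)) = true
              · have hP : Phit q k = true := by
                  simp only [Phit, htop, htop', Bool.true_and]; exact hsw
                have hfind : findOpAtIndex q (k : Int) ≠ none := by
                  by_cases hA : swOp q k (" AND ".toList) = true
                  · rw [findOpAtIndex_cast, if_pos hA]; simp
                  · have hO : swOp q k (" OR ".toList) = true := by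
                      rcases Bool.or_eq_true_iff.mp hsw with h | h
                      · exact absurd h hA
                      · exact h
                    rw [findOpAtIndex_cast, if_neg hA, if_pos hO]; simp
                simp only [loopA, h1, h3, h4, if_false, if_true, firstFrom, hP]
                rcases hopt : findOpAtIndex q (k : Int) with _ | v
                · exact absurd hopt hfind
                · rfl
              · have hP : Phit q k = false := by
                  simp only [Phit, htop, htop', Bool.true_and]
                  simpa using hsw
                have hfind : findOpAtIndex q (k : Int) = none := by
                  simp only [Bool.or_eq_true, not_or] at hsw
                  rw [findOpAtIndex_cast, if_neg hsw.1, if_neg hsw.2]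
                simp only [loopA, h1, h3, h4, if_false, if_true, firstFrom, hP,
                  Bool.false_eq_true, hfind]
                exact hih
            · have hP : Phit q k = false := by simp [Phit, htop, topChar, h5]
              simp only [loopA, h1, h3, h4, h5, if_false, firstFrom, hP, Bool.false_eq_true]
              exact hih

theorem firstFrom_spec (q : List Char) : ∀ (t : List Char) (k : Nat), t = q.drop k →
    (∀ i, firstFrom q k t = some i → k ≤ i ∧ Phit q i = true ∧ ∀ j, k ≤ j → j < i → Phit q j = false)
    ∧ (firstFrom q k t = none → ∀ j, k ≤ j → Phit q j = false) := by
  intro t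
  induction t with
  | nil =>
    intro k ht
    refine ⟨by simp [firstFrom], ?_⟩
    intro _ j hj
    have hlen : q.length ≤ k := by
      by_contra hlt
      push Not at hlt
      have := congrArg List.length ht
      simp [List.length_drop] at this
      omega
    have : topAt q j = false := topAt_of_ge q j (by omega)
    simp [Phit, this]
  | cons ch t' ih =>
    intro k ht
    have hk : k < q.length := by
      by_contra hge
      push Not at hge
      rw [List.drop_eq_nil_of_le hge] at ht
      exact (List.cons_ne_nil ch t') ht
    have ht' : t' = q.drop (k + 1) := by
      have := List.drop_eq_getElem_cons hk (l := q)
      rw [this] at ht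
      exact (List.cons.injEq _ _ _ _).mp ht.symm |>.2.symm
    have hih := ih (k + 1) ht'
    by_cases hp : Phit q k = true
    · constructor
      · intro i hi
        simp [firstFrom, hp] at hi
        subst hi
        exact ⟨le_refl _, hp, by omega⟩
      · intro hnone
        simp [firstFrom, hp] at hnone
    · constructor
      · intro i hi
        simp only [firstFrom, hp] at hi
        obtain ⟨h1, h2, h3⟩ := hih.1 i hi
        refine ⟨by omega, h2, ?_⟩
        intro j hj1 hj2
        rcases Nat.eq_or_lt_of_le hj1 with h | h
        · subst h; simpa using hp
        · exact h3 j h hj2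
      · intro hnone j hj1
        simp only [firstFrom, hp] at hnone
        rcases Nat.eq_or_lt_of_le hj1 with h | h
        · subst h; simpa using hp
        · exact hih.2 hnone j h

theorem findLoop_spec (u : List Char) (mask : List Bool) (op : List Char) (hop : op ≠ []) :
    ∀ (fuel : Nat) (k : Nat), k ≤ u.length → u.length + 1 - k ≤ fuel →
    (findLoop u mask op (PySem.Chars.findFrom u op (k : Int)) fuel = -1
      ∧ ∀ j : Nat, k ≤ j → ¬ (op <+: u.drop j ∧ mask.getD j false = true))
    ∨ (∃ i : Nat, findLoop u mask op (PySem.Chars.findFrom u op (k : Int)) fuel = (i : Int)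
        ∧ k ≤ i ∧ (op <+: u.drop i ∧ mask.getD i false = true)
        ∧ ∀ j : Nat, k ≤ j → j < i → ¬ (op <+: u.drop j ∧ mask.getD j false = true)) := by
  intro fuel
  induction fuel with
  | zero => intro k hk hfuel; omega
  | succ fuel ih =>
    intro k hk hfuel
    by_cases hj : PySem.Chars.findFrom u op (k : Int) = -1
    · left
      constructor
      · rw [hj]; simp [findLoop]
      · intro j hkj ⟨hpre, _⟩
        have hnot : ¬ op <:+: u.drop k := (PySem.Chars.findFrom_natCast_eq_neg_one_iff u op k hk).mp hj
        apply hnot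
        have hdd : u.drop j = (u.drop k).drop (j - k) := by
          rw [List.drop_drop]
          congr 1
          omega
        rw [hdd] at hpre
        exact hpre.isInfix.trans (List.drop_suffix (j - k) (u.drop k)).isInfix
    · obtain ⟨hkle, hpre, hmin⟩ := PySem.Chars.findFrom_natCast_spec u op k hk hj
      set j := PySem.Chars.findFrom u op (k : Int) with hjdef
      have hj0 : 0 ≤ j := le_trans (by exact_mod_cast Int.natCast_nonneg k) hkle
      have hjn : j = ((j.toNat : Nat) : Int) := by omega
      have hkjn : k ≤ j.toNat := by omega
      have hjlen : j.toNat < u.length := by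
        have h1 : op.length ≤ (u.drop j.toNat).length := hpre.length_le
        have h2 : 0 < op.length := List.length_pos_iff.mpr hop
        simp [List.length_drop] at h1
        omega
      have hget : PySem.List.pyGetD mask j false = mask.getD j.toNat false := by
        rw [hjn]; exact PySem.List.pyGetD_natCast mask j.toNat false
      by_cases hm : mask.getD j.toNat false = true
      · have hm2 : mask[j.toNat]?.getD false = true := by simpa [List.getD] using hm
        right
        refine ⟨j.toNat, ?_, hkjn, ⟨hpre, hm⟩, ?_⟩
        · have hstep : findLoop u mask op j (fuel + 1) = j := by
            simp [findLoop, hget, hm2]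
          rw [hstep]; exact hjn
        · intro j' h1 h2 ⟨hpre', _⟩
          exact hmin j' h1 h2 hpre'
      · have hm2 : mask[j.toNat]?.getD false = false := by
          rw [List.getD] at hm
          simpa using hm
        have hrec : findLoop u mask op j (fuel + 1)
            = findLoop u mask op (PySem.Chars.findFrom u op (j + 1)) fuel := by
          simp [findLoop, hget, hm2, hj0]
        have hj1 : j + 1 = ((j.toNat + 1 : Nat) : Int) := by omega
        rw [hj1] at hrec
        have hih := ih (j.toNat + 1) (by omega) (by omega)
        have hmid : ∀ j' : Nat, k ≤ j' → j' < j.toNat + 1 → ¬ (op <+: u.drop j' ∧ mask.getD j' false = true) := by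
          intro j' h1 h2 ⟨hpre', hm'⟩
          rcases Nat.lt_or_ge j' j.toNat with h | h
          · exact hmin j' h1 h hpre'
          · have : j' = j.toNat := by omega
            subst this
            exact hm hm'
        rcases hih with ⟨heq, hall⟩ | ⟨i, heq, hki, hhit, hmini⟩
        · left
          refine ⟨by rw [hrec]; exact heq, ?_⟩
          intro j' h1 hhit'
          rcases Nat.lt_or_ge j' (j.toNat + 1) with h | h
          · exact hmid j' h1 h hhit'
          · exact hall j' h hhit'
        · right
          refine ⟨i, by rw [hrec]; exact heq, by omega, hhit, ?_⟩
          intro j' h1 h2 hhit'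
          rcases Nat.lt_or_ge j' (j.toNat + 1) with h | h
          · exact hmid j' h1 h hhit'
          · exact hmini j' h h2 hhit'

theorem A_eq_normalForm (query : String) : split_boolean_py query = normalForm query.toList := by
  unfold split_boolean_py normalForm
  have h := loopA_eq query.toList query.toList 0 (by simp)
  simpa using h

theorem B_eq_normalForm (query : String) : split_boolean_py_alt query = normalForm query.toList := by
  set q := query.toList with hq
  have hmask : (q.foldl maskStep ([], 0, false)).1 = maskRec q (0, false) := by
    rw [mask_fold]; simp
  have hconv : ∀ (i : Nat) (op : List Char),
      (op <+: (PySem.Chars.upper q).drop i ∧ (maskRec q (0, false)).getD i false = true)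
        ↔ (swOp q i op = true ∧ topAt q i = true) := by
    intro i op
    rw [upper_drop]
    unfold swOp topAt
    rw [PySem.Chars.startswith_iff]
  have hPhit : ∀ i, Phit q i = true ↔
      ((swOp q i (" AND ".toList) = true ∧ topAt q i = true)
        ∨ (swOp q i (" OR ".toList) = true ∧ topAt q i = true)) := by
    intro i
    unfold Phit
    rw [Bool.and_eq_true, Bool.or_eq_true]
    tauto
  have hPfalse : ∀ j : Nat,
      ¬((" AND ".toList) <+: (PySem.Chars.upper q).drop j ∧ (maskRec q (0, false)).getD j false = true) →
      ¬((" OR ".toList) <+: (PySem.Chars.upper q).drop j ∧ (maskRec q (0, false)).getD j false = true) →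
      Phit q j = false := by
    intro j hA hO
    apply Bool.eq_false_iff.mpr
    intro hP
    rcases (hPhit j).mp hP with ⟨h1, h2⟩ | ⟨h1, h2⟩
    · exact hA ((hconv j _).mpr ⟨h1, h2⟩)
    · exact hO ((hconv j _).mpr ⟨h1, h2⟩)
  have hfirst : ∀ i : Nat, Phit q i = true → (∀ j, j < i → Phit q j = false) →
      firstFrom q 0 q = some i := by
    intro i hi hmin
    rcases heq : firstFrom q 0 q with _ | i'
    · have := (firstFrom_spec q q 0 (by simp)).2 heq i (by omega)
      rw [hi] at this; cases this
    · obtain ⟨_, hP', hmin'⟩ := (firstFrom_spec q q 0 (by simp)).1 i' heq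
      have heqi : i' = i := by
        rcases lt_trichotomy i' i with h | h | h
        · have := hmin i' h; rw [hP'] at this; cases this
        · exact h
        · have := hmin' i (by omega) h; rw [hi] at this; cases this
      exact congrArg some heqi
  have hfirstnone : (∀ j : Nat, Phit q j = false) → firstFrom q 0 q = none := by
    intro hall
    rcases heq : firstFrom q 0 q with _ | i'
    · rfl
    · obtain ⟨_, hP', _⟩ := (firstFrom_spec q q 0 (by simp)).1 i' heq
      rw [hall i'] at hP'; cases hP'
  have hA := findLoop_spec (PySem.Chars.upper q) (maskRec q (0, false)) (" AND ".toList)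
      (by decide) ((PySem.Chars.upper q).length + 2) 0 (by omega) (by omega)
  have hO := findLoop_spec (PySem.Chars.upper q) (maskRec q (0, false)) (" OR ".toList)
      (by decide) ((PySem.Chars.upper q).length + 2) 0 (by omega) (by omega)
  simp only [Nat.cast_zero, PySem.Chars.findFrom_zero, List.drop_zero] at hA hO
  simp only [split_boolean_py_alt, normalForm]
  rw [← hq, hmask]
  rcases hA with ⟨hAeq, hAnone⟩ | ⟨a, hAeq, _, hAhit, hAmin⟩
  · rcases hO with ⟨hOeq, hOnone⟩ | ⟨o, hOeq, _, hOhit, hOmin⟩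
    · rw [hAeq, hOeq]
      norm_num
      have hallF : ∀ j : Nat, Phit q j = false := fun j =>
        hPfalse j (hAnone j (by omega)) (hOnone j (by omega))
      rw [hfirstnone hallF]
    · rw [hAeq, hOeq]
      norm_num
      have hminO : ∀ j, j < o → Phit q j = false := fun j hj =>
        hPfalse j (hAnone j (by omega)) (hOmin j (by omega) hj)
      rw [hfirst o ((hPhit o).mpr (Or.inr ((hconv o _).mp hOhit))) hminO]
      have hnA : ¬ swOp q o (" AND ".toList) = true := by
        intro hsw
        exact hAnone o (by omega) ((hconv o _).mpr ⟨hsw, ((hconv o _).mp hOhit).2⟩)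
      show _ = findOpAtIndex q ((o : Nat) : Int)
      rw [findOpAtIndex_cast, if_neg hnA, if_pos ((hconv o _).mp hOhit).1]
      rw [show " OR ".length = 4 from by decide]
      norm_num
  · rcases hO with ⟨hOeq, hOnone⟩ | ⟨o, hOeq, _, hOhit, hOmin⟩
    · rw [hAeq, hOeq]
      norm_num
      have hminA : ∀ j, j < a → Phit q j = false := fun j hj =>
        hPfalse j (hAmin j (by omega) hj) (hOnone j (by omega))
      rw [hfirst a ((hPhit a).mpr (Or.inl ((hconv a _).mp hAhit))) hminA]
      show _ = findOpAtIndex q ((a : Nat) : Int)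
      rw [findOpAtIndex_cast, if_pos ((hconv a _).mp hAhit).1]
      rw [show " AND ".length = 5 from by decide]
      norm_num
    · rw [hAeq, hOeq]
      by_cases ho : o < a
      · have hoc : ((o : Int) < (a : Int)) := by exact_mod_cast ho
        norm_num [hoc]
        have hminO : ∀ j, j < o → Phit q j = false := fun j hj =>
          hPfalse j (hAmin j (by omega) (by omega)) (hOmin j (by omega) hj)
        rw [hfirst o ((hPhit o).mpr (Or.inr ((hconv o _).mp hOhit))) hminO]
        have hnA : ¬ swOp q o (" AND ".toList) = true := by
          intro hsw
          exact hAmin o (by omega) ho ((hconv o _).mpr ⟨hsw, ((hconv o _).mp hOhit).2⟩)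
        show _ = findOpAtIndex q ((o : Nat) : Int)
        rw [findOpAtIndex_cast, if_neg hnA, if_pos ((hconv o _).mp hOhit).1]
        rw [show " OR ".length = 4 from by decide]
        norm_num
      · have hoc : ¬ ((o : Int) < (a : Int)) := by exact_mod_cast ho
        norm_num [hoc]
        have hminA : ∀ j, j < a → Phit q j = false := fun j hj =>
          hPfalse j (hAmin j (by omega) hj) (hOmin j (by omega) (by omega))
        rw [hfirst a ((hPhit a).mpr (Or.inl ((hconv a _).mp hAhit))) hminA]
        show _ = findOpAtIndex q ((a : Nat) : Int)
        rw [findOpAtIndex_cast, if_pos ((hconv a _).mp hAhit).1]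
        rw [show " AND ".length = 5 from by decide]
        norm_num

-- ===== VERDICT (by name: the statement is the Claim_ definition above) =====
theorem split_boolean_py_spec : Claim_equal_split_boolean_py := by
  intro query _
  unfold Spec_split_boolean_py
  rw [A_eq_normalForm, B_eq_normalForm]
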